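-- pv_equiv track=rewrite | github.com/khush-01/Python-codes | HackerRank/Problem Solving/Implementation/Easy/Sequence Equation.py | doublesearch
-- ===== SOURCE A (Python) =====
-- def doublesearch(arr, num):
-- 	i = 0
-- 	for x in range(1, len(arr)+1):
-- 		if arr[x-1] == num:
-- 			i = x
-- 			break
-- 	num = i
-- 	for x in range(1, len(arr)+1):
-- 		if arr[x-1] == num:
-- 			return x
-- ===== SOURCE B (Python) =====
-- def doublesearch(arr, num):
--     # Sort (value, 1-based-position) pairs once, then answer both chained
--     # "first position of value" queries by binary search (lower bound).
--     pairs = sorted((v, x) for x, v in enumerate(arr, 1))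
--
--     def lookup(k):
--         lo, hi = 0, len(pairs)
--         while lo < hi:
--             mid = (lo + hi) // 2
--             if pairs[mid][0] < k:
--                 lo = mid + 1
--             else:
--                 hi = mid
--         if lo < len(pairs) and pairs[lo][0] == k:
--             return pairs[lo][1]
--         return None
--
--     i = lookup(num)
--     return lookup(0 if i is None else i)
-- ===== Notes on version B (the rewrite author's own statement) =====
-- stated objective: alternative
-- what changed: Replaces A's two sequential linear scans with a sort of (value, position) pairs followed by two hand-written lower-bound binary searches that each return the first position of a value.
import Mathlib
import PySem

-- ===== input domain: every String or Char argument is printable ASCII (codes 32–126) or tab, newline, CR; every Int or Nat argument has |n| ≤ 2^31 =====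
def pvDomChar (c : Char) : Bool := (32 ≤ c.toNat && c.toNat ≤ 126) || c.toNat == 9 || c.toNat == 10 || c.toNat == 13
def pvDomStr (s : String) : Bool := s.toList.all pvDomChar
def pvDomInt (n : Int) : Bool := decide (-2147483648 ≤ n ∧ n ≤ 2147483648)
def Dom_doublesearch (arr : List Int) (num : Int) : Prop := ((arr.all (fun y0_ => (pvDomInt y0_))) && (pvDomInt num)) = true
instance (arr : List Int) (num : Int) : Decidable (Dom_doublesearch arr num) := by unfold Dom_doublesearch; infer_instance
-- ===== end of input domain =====

-- B sorts the (value, 1-based position) pairs once and answers both chained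
-- first-position queries by lower-bound binary search, instead of A's two linear scans
-- (alternative algorithm, not claimed faster).

-- ===== PORT A =====
-- first loop: i = first 1-based position of num, else 0 (loop falls through with i = 0)
def dsLoop1 (num : Int) : List Int → Int → Int
  | [], _ => 0
  | a :: rest, x => if a = num then x else dsLoop1 num rest (x + 1)

-- second loop: return first 1-based position of num, else fall off (None)
def dsLoop2 (num : Int) : List Int → Int → Option Int
  | [], _ => none
  | a :: rest, x => if a = num then some x else dsLoop2 num rest (x + 1)

def doublesearch (arr : List Int) (num : Int) : Option Int :=
  let i := dsLoop1 num arr 1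
  dsLoop2 i arr 1

-- ===== PORT B =====
-- pairs = sorted((v, x) for x, v in enumerate(arr, 1)); tuples compare lexicographically
def dsPairs (arr : List Int) : List (Int × Int) :=
  PySem.List.sorted2 ((PySem.List.enumerate arr 1).map (fun p => (p.2, p.1)))
    (fun p => p.1) (fun p => p.2)

-- the while-loop of lookup: lower bound on the first components
def dsBS (pairs : List (Int × Int)) (k : Int) (lo hi : Int) : Int :=
  if _h : lo < hi then
    let mid := PySem.Int.floordiv (lo + hi) 2
    if (PySem.List.pyGetD pairs mid (0, 0)).1 < k then dsBS pairs k (mid + 1) hi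
    else dsBS pairs k lo mid
  else lo
termination_by (hi - lo).toNat
decreasing_by
  · have hb := PySem.Int.floordiv_two_mid_bounds (le_of_lt _h)
    have hlt : PySem.Int.floordiv (lo + hi) 2 < hi :=
      (PySem.Int.floordiv_lt_iff_lt_mul (by omega)).2 (by omega)
    omega
  · have hlt : PySem.Int.floordiv (lo + hi) 2 < hi :=
      (PySem.Int.floordiv_lt_iff_lt_mul (by omega)).2 (by omega)
    omega

-- lookup(k): first 1-based position of value k via the sorted pairs, else None
def dsLookup (pairs : List (Int × Int)) (k : Int) : Option Int :=
  let lo := dsBS pairs k 0 (pairs.length : Int)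
  if lo < (pairs.length : Int) ∧ (PySem.List.pyGetD pairs lo (0, 0)).1 = k then
    some (PySem.List.pyGetD pairs lo (0, 0)).2
  else none

def doublesearch_alt (arr : List Int) (num : Int) : Option Int :=
  let pairs := dsPairs arr
  match dsLookup pairs num with
  | none => dsLookup pairs 0      -- i = 0 when num is absent
  | some i => dsLookup pairs i

-- ===== PRECONDITION & SPEC =====
def Spec_doublesearch (arr : List Int) (num : Int) (out : Option Int) : Prop := out = doublesearch_alt arr num
instance (arr : List Int) (num : Int) (out : Option Int) : Decidable (Spec_doublesearch arr num out) := by unfold Spec_doublesearch; infer_instance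

-- ===== CLAIM (what is proved, stated in full; the proofs are below) =====
def Claim_equal_doublesearch : Prop := ∀ (arr : List Int) (num : Int), Dom_doublesearch arr num → Spec_doublesearch arr num (doublesearch arr num)

-- ===== LEMMAS AND PROOFS =====

-- A's first loop is the second loop's answer with default 0
theorem dsLoop1_eq_getD (num : Int) (l : List Int) (x : Int) :
    dsLoop1 num l x = (dsLoop2 num l x).getD 0 := by
  induction l generalizing x with
  | nil => simp [dsLoop1, dsLoop2]
  | cons a rest ih =>
    simp only [dsLoop1, dsLoop2]
    by_cases h : a = num <;> simp [h, ih]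

theorem dsLoop2_eq_none_iff (k : Int) (l : List Int) (s : Int) :
    dsLoop2 k l s = none ↔ k ∉ l := by
  induction l generalizing s with
  | nil => simp [dsLoop2]
  | cons a rest ih =>
    simp only [dsLoop2]
    by_cases h : a = k
    · simp [h]
    · rw [if_neg h, ih]
      simp only [List.mem_cons, not_or]
      exact ⟨fun hh => ⟨fun he => h he.symm, hh⟩, fun hh => hh.2⟩

theorem dsLoop2_eq_some_of (k : Int) (l : List Int) (s : Int) (j : Nat) (hj : j < l.length)
    (hk : l[j] = k) (hmin : ∀ j' : Nat, j' < j → ∀ hj' : j' < l.length, l[j'] ≠ k) :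
    dsLoop2 k l s = some (s + j) := by
  induction l generalizing s j with
  | nil => simp at hj
  | cons a rest ih =>
    simp only [dsLoop2]
    by_cases h : a = k
    · have hj0 : j = 0 := by
        by_contra hne
        exact hmin 0 (Nat.pos_of_ne_zero hne) (by simp) h
      subst hj0
      simp [h]
    · have hj0 : j ≠ 0 := by
        intro h0; subst h0; simp at hk; exact h hk
      obtain ⟨j', rfl⟩ : ∃ j', j = j' + 1 := ⟨j - 1, by omega⟩
      simp only [h, if_false]
      have := ih (s + 1) j' (by simpa using hj) (by simpa using hk)
        (fun j'' hlt hj'' => by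
          have := hmin (j'' + 1) (by omega) (by simpa using hj'')
          simpa using this)
      rw [this]
      congr 1
      push_cast
      ring

-- the enumerated swapped pairs
theorem mem_dsPairs (arr : List Int) (p : Int × Int) :
    p ∈ dsPairs arr ↔ ∃ j : Nat, ∃ _h : j < arr.length, p = (arr[j], (1 : Int) + j) := by
  unfold dsPairs
  rw [PySem.List.sorted2_perm _ _ _ _ |>.mem_iff]
  simp only [List.mem_map, PySem.List.mem_enumerate_iff]
  constructor
  · rintro ⟨q, ⟨j, hj, rfl⟩, rfl⟩
    exact ⟨j, hj, rfl⟩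
  · rintro ⟨j, hj, rfl⟩
    exact ⟨((1 : Int) + j, arr[j]), ⟨j, hj, rfl⟩, rfl⟩

-- sorted2 with component keys is sorted with the lexicographic key
theorem dsPairs_eq_sorted (arr : List Int) :
    dsPairs arr = PySem.List.sorted ((PySem.List.enumerate arr 1).map (fun p => (p.2, p.1)))
      (fun p => toLex p) := by
  unfold dsPairs
  rw [PySem.List.sorted_eq_foldl_insertBy]
  show List.foldl _ [] _ = List.foldl _ [] _
  congr 1
  funext acc p
  congr 1
  funext a b
  rcases lt_trichotomy a.1 b.1 with h1 | h1 | h1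
  · simp [Prod.Lex.toLex_lt_toLex, h1]
  · simp [Prod.Lex.toLex_lt_toLex, h1]
  · simp [Prod.Lex.toLex_lt_toLex, asymm h1, h1.ne']; omega

theorem dsPairs_pairwise (arr : List Int) :
    (dsPairs arr).Pairwise (fun a b => a.1 < b.1 ∨ (a.1 = b.1 ∧ a.2 < b.2)) := by
  have hle : (dsPairs arr).Pairwise (fun a b : Int × Int => toLex a ≤ toLex b) := by
    rw [dsPairs_eq_sorted]
    exact PySem.List.sorted_pairwise _ _
  have hnodupE : ((PySem.List.enumerate arr 1).map (fun p => (p.2, p.1))).Nodup := by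
    apply List.Nodup.map
    · intro p q h
      exact Prod.ext (congrArg Prod.snd h) (congrArg Prod.fst h)
    · exact (PySem.List.pairwise_lt_enumerate arr 1).imp
        (fun h he => by rw [he] at h; exact lt_irrefl _ h)
  have hnodup : (dsPairs arr).Nodup := by
    rw [dsPairs_eq_sorted]
    exact (PySem.List.sorted_perm _ _ _).nodup_iff.mpr hnodupE
  refine (hle.and hnodup).imp ?_
  rintro a b ⟨h1, h2⟩
  rw [← Prod.Lex.toLex_lt_toLex]
  exact lt_of_le_of_ne h1 (fun he => h2 (toLex.injective he))

theorem dsPairs_mono (arr : List Int) (i j : Nat) (hij : i ≤ j)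
    (hj : j < (dsPairs arr).length) :
    ((dsPairs arr)[i]'(lt_of_le_of_lt hij hj)).1 ≤ ((dsPairs arr)[j]'hj).1 := by
  rcases Nat.lt_or_ge i j with h | h
  · rcases (List.pairwise_iff_getElem.mp (dsPairs_pairwise arr)) i j _ hj h with h1 | ⟨h1, _⟩
    · exact le_of_lt h1
    · exact le_of_eq h1
  · have : i = j := le_antisymm hij h
    subst this; exact le_refl _

-- binary-search invariant: dsBS returns the lower bound of k among the first components
theorem dsBS_spec (pairs : List (Int × Int)) (k : Int)
    (hmono : ∀ i j : Nat, ∀ hij : i ≤ j, ∀ hj : j < pairs.length,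
      (pairs[i]'(lt_of_le_of_lt hij hj)).1 ≤ (pairs[j]'hj).1) :
    ∀ (n : Nat) (lo hi : Int), (hi - lo).toNat = n → 0 ≤ lo → lo ≤ hi → hi ≤ (pairs.length : Int) →
    (∀ j : Nat, ∀ hj : j < pairs.length, (j : Int) < lo → (pairs[j]'hj).1 < k) →
    (∀ j : Nat, ∀ hj : j < pairs.length, hi ≤ (j : Int) → k ≤ (pairs[j]'hj).1) →
    lo ≤ dsBS pairs k lo hi ∧ dsBS pairs k lo hi ≤ hi ∧
    (∀ j : Nat, ∀ hj : j < pairs.length, (j : Int) < dsBS pairs k lo hi → (pairs[j]'hj).1 < k) ∧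
    (∀ j : Nat, ∀ hj : j < pairs.length, dsBS pairs k lo hi ≤ (j : Int) → k ≤ (pairs[j]'hj).1) := by
  intro n
  induction n using Nat.strong_induction_on with
  | _ n ih =>
    intro lo hi hn h0 hlh hhl hlow hhigh
    rw [dsBS]
    by_cases hcond : lo < hi
    · simp only [hcond, dif_pos]
      have hb := PySem.Int.floordiv_two_mid_bounds (le_of_lt hcond)
      have hmidlt : PySem.Int.floordiv (lo + hi) 2 < hi :=
        (PySem.Int.floordiv_lt_iff_lt_mul (by omega)).2 (by omega)
      set mid := PySem.Int.floordiv (lo + hi) 2 with hmid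
      have hmlen : mid < (pairs.length : Int) := lt_of_lt_of_le hmidlt hhl
      have h0m : 0 ≤ mid := le_trans h0 hb.1
      have hmn : mid.toNat < pairs.length := by omega
      have hget : PySem.List.pyGetD pairs mid (0, 0) = pairs[mid.toNat]'hmn :=
        PySem.List.pyGetD_eq_getElem pairs (0, 0) h0m hmlen
      rw [hget]
      by_cases hc : (pairs[mid.toNat]'hmn).1 < k
      · simp only [hc, if_true]
        refine (ih (hi - (mid + 1)).toNat (by omega) (mid + 1) hi (by rfl) (by omega)
          (by omega) hhl ?_ hhigh).imp (fun h => by omega) (fun h => h)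
        intro j hj hjlt
        have hjm : j ≤ mid.toNat := by omega
        exact lt_of_le_of_lt (hmono j mid.toNat hjm hmn) hc
      · simp only [hc, if_false]
        refine (ih (mid - lo).toNat (by omega) lo mid (by rfl) h0
          hb.1 (le_of_lt hmlen) hlow ?_).imp (fun h => h) (fun h => ⟨le_trans h.1 (le_of_lt hmidlt), h.2⟩)
        intro j hj hjge
        have : mid.toNat ≤ j := by omega
        exact le_trans (le_of_not_gt hc) (hmono mid.toNat j this hj)
    · simp only [hcond]
      have : hi ≤ lo := le_of_not_gt hcond
      exact ⟨le_refl _, hlh, hlow, fun j hj hge => hhigh j hj (le_trans this hge)⟩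

-- the binary-search lookup equals A's linear first-position scan
theorem dsLookup_eq (arr : List Int) (k : Int) :
    dsLookup (dsPairs arr) k = dsLoop2 k arr 1 := by
  have hmono := dsPairs_mono arr
  have hspec := dsBS_spec (dsPairs arr) k hmono (((dsPairs arr).length : Int) - 0).toNat 0
    ((dsPairs arr).length : Int) rfl (le_refl 0) (by positivity) (le_refl _)
    (fun j hj h => absurd h (by omega)) (fun j hj h => absurd h (by omega))
  obtain ⟨hr0, hrlen, hlow, hhigh⟩ := hspec
  unfold dsLookup
  set r := dsBS (dsPairs arr) k 0 ((dsPairs arr).length : Int) with hr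
  by_cases hc : r < ((dsPairs arr).length : Int) ∧ (PySem.List.pyGetD (dsPairs arr) r (0, 0)).1 = k
  · rw [if_pos hc]
    obtain ⟨hrl, hrk⟩ := hc
    have hrn : r.toNat < (dsPairs arr).length := by omega
    have hget : PySem.List.pyGetD (dsPairs arr) r (0, 0) = (dsPairs arr)[r.toNat]'hrn :=
      PySem.List.pyGetD_eq_getElem _ (0, 0) hr0 hrl
    rw [hget] at hrk ⊢
    -- the found pair comes from some position j0 of arr
    have hmem : ((dsPairs arr)[r.toNat]'hrn) ∈ dsPairs arr := List.getElem_mem hrn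
    obtain ⟨j0, hj0, hp0⟩ := (mem_dsPairs arr _).mp hmem
    have harrj0 : arr[j0] = k := by rw [hp0] at hrk; simpa using hrk
    have hsnd : ((dsPairs arr)[r.toNat]'hrn).2 = (1 : Int) + j0 := by rw [hp0]
    rw [hsnd]
    symm
    apply dsLoop2_eq_some_of k arr 1 j0 hj0 harrj0
    -- minimality: no earlier position of arr holds k
    intro j' hj'lt hj' hk'
    have hmem' : ((k : Int), ((1 : Int) + j')) ∈ dsPairs arr := by
      rw [mem_dsPairs]
      exact ⟨j', hj', by rw [hk']⟩
    obtain ⟨m, hm, hpm⟩ := List.getElem_of_mem hmem'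
    rcases Nat.lt_trichotomy m r.toNat with h | h | h
    · have := hlow m hm (by omega)
      rw [hpm] at this
      exact absurd this (by simp)
    · subst h
      have := congrArg Prod.snd hpm
      rw [hsnd] at this
      simp only [Int.add_right_inj] at this
      omega
    · have := (List.pairwise_iff_getElem.mp (dsPairs_pairwise arr)) r.toNat m hrn hm h
      rw [hpm] at this
      rcases this with h1 | ⟨_, h2⟩
      · rw [hrk] at h1; exact absurd h1 (by simp)
      · rw [hsnd] at h2; simp at h2; omega
  · simp only [hc, if_false]
    symm
    rw [dsLoop2_eq_none_iff]
    intro hkmem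
    obtain ⟨j0, hj0, harrj0⟩ := List.getElem_of_mem hkmem
    have hmem' : ((k : Int), ((1 : Int) + j0)) ∈ dsPairs arr := by
      rw [mem_dsPairs]
      exact ⟨j0, hj0, by rw [harrj0]⟩
    obtain ⟨m, hm, hpm⟩ := List.getElem_of_mem hmem'
    rcases Int.lt_or_le (m : Int) r with h | h
    · have := hlow m hm h
      rw [hpm] at this
      exact absurd this (by simp)
    · -- r ≤ m < len, so r < len; the lookup test failed, so the pair at r is not k
      have hrl : r < ((dsPairs arr).length : Int) := lt_of_le_of_lt h (by exact_mod_cast hm)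
      have hrn : r.toNat < (dsPairs arr).length := by omega
      have hget : PySem.List.pyGetD (dsPairs arr) r (0, 0) = (dsPairs arr)[r.toNat]'hrn :=
        PySem.List.pyGetD_eq_getElem _ (0, 0) hr0 hrl
      have hne : ((dsPairs arr)[r.toNat]'hrn).1 ≠ k := by
        intro he
        exact hc ⟨hrl, by rw [hget, he]⟩
      have hk_le : k ≤ ((dsPairs arr)[r.toNat]'hrn).1 := hhigh r.toNat hrn (by omega)
      have hmono' := hmono r.toNat m (by omega) hm
      rw [hpm] at hmono'
      simp only at hmono'
      omega

-- ===== VERDICT (by name: the statement is the Claim_ definition above) =====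
theorem doublesearch_spec : Claim_equal_doublesearch := by
  intro arr num _
  unfold Spec_doublesearch doublesearch doublesearch_alt
  simp only [dsLookup_eq, dsLoop1_eq_getD]
  cases h : dsLoop2 num arr 1 <;> simp [h]
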